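-- pv_equiv track=rewrite | github.com/goobiy/A3-Gagnaskipan | word_freq.py | word_frequency_alphabetical_pydict
-- ===== SOURCE A (Python) =====
-- def word_frequency_alphabetical_pydict(text):
--     """
--     Returns a list of (word, frequency) tuples ordered alphabetically, with all words translated to lowercase,
--     e.g., given the text "I am so so happy happy Happy" it returns [('am', 1), ('happy', 3), ('i', 1), ('so', 2)].
--     Should be implemented using Python's build-in dictionary.
--     :param text: text to process
--     :return: list of word frequencies
--     """
--     word_freq = {}
--
--     text = text.strip()
--     text = text.lower()
--
--     words_list = text.split()
--
--     for word in words_list: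
--         if word in word_freq:
--             word_freq[word] = word_freq[word] + 1
--         else:
--             word_freq[word] = 1
--
--
--     freq_list = [(key,value) for key, value in word_freq.items()]
--
--     return sorted(freq_list)
-- ===== SOURCE B (Python) =====
-- def word_frequency_alphabetical_pydict(text):
--     # Sort the tokens, then run-length encode the sorted list; no dict anywhere.
--     words = sorted(text.strip().lower().split())
--     if not words:
--         return []
--     out = []
--     cur = words[0]
--     cnt = 1
--     for w in words[1:]:
--         if w == cur:
--             cnt += 1
--         else:
--             out.append((cur, cnt))
--             cur = w
--             cnt = 1
--     out.append((cur, cnt))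
--     return out
-- ===== Notes on version B (the rewrite author's own statement) =====
-- stated objective: alternative
-- what changed: Replaces the dict-based counting pass followed by sorting of (word,count) pairs with sorting the token list itself and run-length encoding the sorted run of equal words in one linear scan; no dictionary is used.
import Mathlib
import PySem

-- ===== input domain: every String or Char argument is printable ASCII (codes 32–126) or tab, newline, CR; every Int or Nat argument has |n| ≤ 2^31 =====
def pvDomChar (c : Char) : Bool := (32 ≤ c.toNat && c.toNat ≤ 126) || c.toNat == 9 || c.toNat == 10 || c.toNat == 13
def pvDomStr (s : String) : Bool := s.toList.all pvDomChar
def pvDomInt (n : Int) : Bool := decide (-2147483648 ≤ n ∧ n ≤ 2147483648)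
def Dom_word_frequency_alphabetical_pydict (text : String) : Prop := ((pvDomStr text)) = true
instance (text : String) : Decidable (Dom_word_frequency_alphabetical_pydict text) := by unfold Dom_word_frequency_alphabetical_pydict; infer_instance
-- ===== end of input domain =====

-- B replaces A's dict-based counting + sort of the (word,count) items with sorting the token
-- list itself and run-length encoding the sorted runs in one scan (objective: alternative).


-- ===== PORT A =====
def word_frequency_alphabetical_pydict (text : String) : List (String × Int) :=
  let text1 := PySem.Str.strip text
  let text2 := PySem.Str.lower text1
  let words_list := PySem.Str.split₀ text2
  let word_freq := words_list.foldl
    (fun (d : PySem.Dict String Int) w =>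
      if d.contains w then d.insert w (d.getD w 0 + 1) else d.insert w 1)
    PySem.Dict.empty
  let freq_list := word_freq.items.map (fun kv => (kv.1, kv.2))
  PySem.List.sorted2 freq_list (fun p => p.1) (fun p => p.2) false

-- ===== PORT B =====
def word_frequency_alphabetical_pydict_alt (text : String) : List (String × Int) :=
  let words := PySem.List.sorted (PySem.Str.split₀ (PySem.Str.lower (PySem.Str.strip text))) (fun w => w) false
  match words with
  | [] => []
  | w0 :: rest =>
    let s := rest.foldl
      (fun (s : List (String × Int) × String × Int) w =>
        if w == s.2.1 then (s.1, s.2.1, s.2.2 + 1) else (s.1 ++ [(s.2.1, s.2.2)], w, 1))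
      ([], w0, 1)
    s.1 ++ [(s.2.1, s.2.2)]

-- ===== PRECONDITION & SPEC =====
def Spec_word_frequency_alphabetical_pydict (text : String) (out : List (String × Int)) : Prop := out = word_frequency_alphabetical_pydict_alt text
instance (text : String) (out : List (String × Int)) : Decidable (Spec_word_frequency_alphabetical_pydict text out) := by unfold Spec_word_frequency_alphabetical_pydict; infer_instance

-- ===== CLAIM (what is proved, stated in full; the proofs are below) =====
def Claim_equal_word_frequency_alphabetical_pydict : Prop := ∀ (text : String), Dom_word_frequency_alphabetical_pydict text → Spec_word_frequency_alphabetical_pydict text (word_frequency_alphabetical_pydict text)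

-- ===== LEMMAS AND PROOFS =====

-- insertBy only compares the inserted element against members of the accumulator.
theorem pv_insertBy_congr {α : Type} (f g : α → α → Bool) (x : α) (acc : List α)
    (h : ∀ y ∈ acc, f x y = g x y) :
    PySem.List.insertBy f x acc = PySem.List.insertBy g x acc := by
  induction acc with
  | nil => rfl
  | cons y ys ih =>
    simp only [PySem.List.insertBy]
    rw [h y (List.mem_cons_self)]
    by_cases hb : g x y = true
    · simp [hb]
    · simp only [hb]
      have := ih (fun z hz => h z (List.mem_cons_of_mem _ hz))
      simp only at this
      rw [this]

theorem pv_foldl_insertBy_congr {α : Type} (f g : α → α → Bool) (l : List α) (acc : List α)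
    (h : ∀ a b : α, (a ∈ l ∨ a ∈ acc) → (b ∈ l ∨ b ∈ acc) → f a b = g a b) :
    l.foldl (fun acc x => PySem.List.insertBy f x acc) acc
      = l.foldl (fun acc x => PySem.List.insertBy g x acc) acc := by
  induction l generalizing acc with
  | nil => rfl
  | cons x xs ih =>
    simp only [List.foldl_cons]
    rw [pv_insertBy_congr f g x acc (fun y hy => h x y (Or.inl List.mem_cons_self) (Or.inr hy))]
    apply ih
    intro a b ha hb
    apply h a b
    · rcases ha with ha | ha
      · exact Or.inl (List.mem_cons_of_mem _ ha)
      · rcases (PySem.List.mem_insertBy g x a acc).mp ha with h' | h'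
        · exact Or.inl (h' ▸ List.mem_cons_self)
        · exact Or.inr h'
    · rcases hb with hb | hb
      · exact Or.inl (List.mem_cons_of_mem _ hb)
      · rcases (PySem.List.mem_insertBy g x b acc).mp hb with h' | h'
        · exact Or.inl (h' ▸ List.mem_cons_self)
        · exact Or.inr h'

-- Python's tuple sort: the first components here are injective, so the second key is never consulted.
theorem pv_sorted2_eq_sorted (xs : List (String × Int))
    (hinj : ∀ a ∈ xs, ∀ b ∈ xs, a.1 = b.1 → a = b) :
    PySem.List.sorted2 xs (fun p => p.1) (fun p => p.2) false
      = PySem.List.sorted xs (fun p => p.1) false := by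
  simp only [PySem.List.sorted2, PySem.List.sorted, if_neg (by simp : ¬(false = true))]
  apply pv_foldl_insertBy_congr
  intro a b ha hb
  have ha' := ha.resolve_right (by simp)
  have hb' := hb.resolve_right (by simp)
  rcases lt_trichotomy a.1 b.1 with h | h | h
  · simp [h]
  · have : a = b := hinj a ha' b hb' h
    subst this
    simp
  · simp [not_lt_of_gt h, h]

-- dedup of a list is a sublist of it.
theorem pv_ofList_sublist {α : Type} [BEq α] [LawfulBEq α] (l : List α) :
    (PySem.Set.ofList l).Sublist l := by
  induction l with
  | nil => simp [PySem.Set.ofList]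
  | cons x xs ih =>
    rw [PySem.Set.ofList_cons]
    exact List.Sublist.cons₂ x ((List.filter_sublist).trans ih)

-- dedup of a weakly increasing list is strictly increasing.
theorem pv_ofList_pairwise_lt {α : Type} [BEq α] [LawfulBEq α] [LinearOrder α] (l : List α)
    (h : l.Pairwise (· ≤ ·)) : (PySem.Set.ofList l).Pairwise (· < ·) := by
  have h1 : (PySem.Set.ofList l).Pairwise (· ≤ ·) := h.sublist (pv_ofList_sublist l)
  have h2 : (PySem.Set.ofList l).Pairwise (· ≠ ·) := PySem.Set.nodup_ofList l
  exact (h1.and h2).imp (fun hab => lt_of_le_of_ne hab.1 hab.2)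

theorem pv_filter_self (s : List String) (p : String → Bool) :
    (s.filter p).filter p = s.filter p := by
  apply List.filter_eq_self.mpr
  intro a ha
  exact List.of_mem_filter ha

theorem pv_scan_invariant (rest : List String) (out : List (String × Int)) (cur : String) (cnt : Int)
    (hp : rest.Pairwise (· ≤ ·)) (hcur : ∀ w ∈ rest, cur ≤ w) :
    ((rest.foldl
      (fun (s : List (String × Int) × String × Int) w =>
        if w == s.2.1 then (s.1, s.2.1, s.2.2 + 1) else (s.1 ++ [(s.2.1, s.2.2)], w, 1))
      (out, cur, cnt)).1 ++
     [((rest.foldl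
      (fun (s : List (String × Int) × String × Int) w =>
        if w == s.2.1 then (s.1, s.2.1, s.2.2 + 1) else (s.1 ++ [(s.2.1, s.2.2)], w, 1))
      (out, cur, cnt)).2.1,
       (rest.foldl
      (fun (s : List (String × Int) × String × Int) w =>
        if w == s.2.1 then (s.1, s.2.1, s.2.2 + 1) else (s.1 ++ [(s.2.1, s.2.2)], w, 1))
      (out, cur, cnt)).2.2)])
    = out ++ (cur, cnt + (rest.count cur : Int)) ::
        ((PySem.Set.ofList rest).discard cur).map (fun k => (k, (rest.count k : Int))) := by
  induction rest generalizing out cur cnt with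
  | nil => simp [PySem.Set.ofList, PySem.Set.discard]
  | cons w rest' ih =>
    have hp' : rest'.Pairwise (· ≤ ·) := hp.of_cons
    have hw : ∀ x ∈ rest', w ≤ x := fun x hx => (List.pairwise_cons.mp hp).1 x hx
    by_cases hwc : w = cur
    · subst hwc
      simp only [List.foldl_cons, beq_self_eq_true, if_true]
      rw [ih out w (cnt + 1) hp' hw]
      rw [PySem.Set.ofList_cons]
      simp only [PySem.Set.discard, List.filter_cons, beq_self_eq_true, Bool.not_true,
        List.count_cons_self, pv_filter_self]
      congr 2
      · simp only [Prod.mk.injEq, true_and]; push_cast; ring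
      · apply List.map_congr_left
        intro k hk
        have hkw : (k == w) = false := by
          have := List.of_mem_filter hk; simpa using this
        have : ¬ (w = k) := fun h => by simp [h] at hkw
        simp [this]
    · have hcw : cur < w := lt_of_le_of_ne (hcur w List.mem_cons_self) (fun h => hwc h.symm)
      have hbeq : (w == cur) = false := by simp [hwc]
      simp only [List.foldl_cons, hbeq, if_false, Bool.false_eq_true]
      rw [ih (out ++ [(cur, cnt)]) w 1 hp' hw]
      have hrest'ne : ∀ x ∈ rest', (x == cur) = false := by
        intro x hx
        have : cur < x := lt_of_lt_of_le hcw (hw x hx)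
        simp [ne_of_gt this]
      have hcount0 : rest'.count cur = 0 := by
        rw [List.count_eq_zero]
        intro h
        simpa using hrest'ne cur h
      rw [PySem.Set.ofList_cons]
      simp only [PySem.Set.discard, List.filter_cons, hbeq, Bool.not_false, if_true,
        List.filter_filter]
      have hmem : ∀ x ∈ (PySem.Set.ofList rest' : List String), (x == cur) = false := by
        intro x hx
        exact hrest'ne x ((PySem.Set.mem_ofList rest' x).mp hx)
      -- rewrite RHS inner filter composition: filter (!·==cur) (filter (!·==w) (ofList rest'))
      have hcomb : (List.filter (fun y => (!y == cur) && (!y == w)) (PySem.Set.ofList rest'))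
          = List.filter (fun y => !y == w) (PySem.Set.ofList rest') := by
        apply List.filter_congr
        intro x hx
        simp [hmem x hx]
      have hc1 : List.count cur (w :: rest') = 0 := by
        simp [hcount0, hwc]
      have hc2 : List.count w (w :: rest') = List.count w rest' + 1 := by simp
      have hmap : List.map (fun k => (k, (List.count k (w :: rest') : Int)))
            (List.filter (fun y => !y == w) (PySem.Set.ofList rest'))
          = List.map (fun k => (k, (List.count k rest' : Int)))
            (List.filter (fun y => !y == w) (PySem.Set.ofList rest')) := by
        apply List.map_congr_left
        intro k hk
        have hkw : (k == w) = false := by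
          have := List.of_mem_filter hk; simpa using this
        have hne2 : ¬ (w = k) := fun h => by simp [h] at hkw
        simp [hne2]
      simp only [List.map_cons, hc1, hc2, hcomb, hmap]
      push_cast
      simp [List.append_assoc]
      omega

-- The two ports agree for an arbitrary token list.
theorem pv_core (ws : List String) :
    PySem.List.sorted2
      ((ws.foldl
        (fun (d : PySem.Dict String Int) w =>
          if d.contains w then d.insert w (d.getD w 0 + 1) else d.insert w 1)
        PySem.Dict.empty).items.map (fun kv => (kv.1, kv.2)))
      (fun p => p.1) (fun p => p.2) false
    = (match PySem.List.sorted ws (fun w => w) false with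
       | [] => []
       | w0 :: rest =>
         let s := rest.foldl
           (fun (s : List (String × Int) × String × Int) w =>
             if w == s.2.1 then (s.1, s.2.1, s.2.2 + 1) else (s.1 ++ [(s.2.1, s.2.2)], w, 1))
           ([], w0, 1)
         s.1 ++ [(s.2.1, s.2.2)]) := by
  have hstep : ws.foldl
      (fun (d : PySem.Dict String Int) w =>
        if d.contains w then d.insert w (d.getD w 0 + 1) else d.insert w 1)
      PySem.Dict.empty = PySem.Dict.counter ws := by
    rw [PySem.List.foldl_congr_mem ws _ (fun (d : PySem.Dict String Int) w => d.insert w (d.getD w 0 + 1)) _ ?_]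
    · exact PySem.Dict.foldl_insert_getD_add_one_eq_counter ws
    · intro d w _
      by_cases hc : d.contains w = true
      · simp [hc]
      · have hc' : d.contains w = false := by simpa using hc
        simp [hc', PySem.Dict.getD_of_not_contains d 0 hc']
  rw [hstep, PySem.Dict.items_counter]
  have hid : (List.map (fun k => (k, (List.count k ws : Int))) (PySem.Set.ofList ws)).map
      (fun kv => (kv.1, kv.2)) = List.map (fun k => (k, (List.count k ws : Int))) (PySem.Set.ofList ws) := by
    simp
  rw [hid]
  -- drop the unused second sort key
  have hinj : ∀ a ∈ List.map (fun k => (k, (List.count k ws : Int))) (PySem.Set.ofList ws),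
      ∀ b ∈ List.map (fun k => (k, (List.count k ws : Int))) (PySem.Set.ofList ws), a.1 = b.1 → a = b := by
    intro a ha b hb hk
    obtain ⟨ka, -, rfl⟩ := List.mem_map.mp ha
    obtain ⟨kb, -, rfl⟩ := List.mem_map.mp hb
    simp only at hk
    subst hk
    rfl
  rw [pv_sorted2_eq_sorted _ hinj]
  -- both sides equal the run-length encoding of the sorted word list
  cases hsws : PySem.List.sorted ws (fun w => w) false with
  | nil =>
    have : ws = [] := (PySem.List.sorted_eq_nil_iff ws (fun w => w) false).mp hsws
    subst this
    rfl
  | cons w0 rest =>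
    have hpair : (w0 :: rest).Pairwise (· ≤ ·) := by
      have := PySem.List.sorted_pairwise ws (fun w => w)
      rwa [hsws] at this
    have hperm : (PySem.List.sorted ws (fun w => w) false).Perm ws :=
      PySem.List.sorted_perm ws (fun w => w) false
    have hcount : ∀ k, List.count k ws = List.count k (w0 :: rest) := by
      intro k
      rw [← hsws]
      exact (hperm.count_eq k).symm
    dsimp only
    rw [pv_scan_invariant rest [] w0 1 hpair.of_cons
      (fun w hw => (List.pairwise_cons.mp hpair).1 w hw)]
    -- the A side: name the sorted order as the dedup of the sorted words, mapped with counts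
    have hys : PySem.List.sorted
        (List.map (fun k => (k, (List.count k ws : Int))) (PySem.Set.ofList ws)) (fun p => p.1) false
        = List.map (fun k => (k, (List.count k ws : Int)))
            (PySem.Set.ofList (PySem.List.sorted ws (fun w => w) false)) := by
      apply PySem.List.sorted_eq_of_perm_of_pairwise_lt
      · apply List.Perm.map
        apply (List.perm_ext_iff_of_nodup (PySem.Set.nodup_ofList _) (PySem.Set.nodup_ofList _)).mpr
        intro x
        rw [PySem.Set.mem_ofList, PySem.Set.mem_ofList, PySem.List.mem_sorted]
      · rw [List.pairwise_map]
        exact pv_ofList_pairwise_lt _ (PySem.List.sorted_pairwise ws (fun w => w))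
    rw [hys, hsws, PySem.Set.ofList_cons]
    simp only [List.map_cons, List.nil_append, PySem.Set.discard]
    congr 1
    · simp only [Prod.mk.injEq, true_and]
      rw [hcount w0]
      simp
      omega
    · apply List.map_congr_left
      intro k hk
      have hkw : (k == w0) = false := by
        have := List.of_mem_filter hk; simpa using this
      have hne : ¬ (w0 = k) := fun h => by simp [h] at hkw
      rw [hcount k]
      simp [hne]

-- ===== VERDICT (by name: the statement is the Claim_ definition above) =====
set_option maxHeartbeats 1600000 in
theorem word_frequency_alphabetical_pydict_spec : Claim_equal_word_frequency_alphabetical_pydict := by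
  intro text _
  unfold Spec_word_frequency_alphabetical_pydict
  show word_frequency_alphabetical_pydict text = word_frequency_alphabetical_pydict_alt text
  simp only [word_frequency_alphabetical_pydict, word_frequency_alphabetical_pydict_alt]
  generalize PySem.Str.split₀ (PySem.Str.lower (PySem.Str.strip text)) = ws
  exact pv_core ws
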